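-- pv_equiv track=rewrite | github.com/xoposhiy/russian-doll-bench | server/terminals/sys32/sys32_terminal.py | _bd32_encode
-- ===== SOURCE A (Python) =====
-- ALPHABET = "23456789ABCDEFGHJKLMNPQRSTUVWXYZ"
--
-- def _bd32_encode(text: str, alphabet: str = ALPHABET) -> str:
--     data = text.encode("utf-8")
--     if not data:
--         return ""
--
--     # Delta-encode bytes
--     deltas = bytearray(len(data))
--     deltas[0] = data[0]
--     for i in range(1, len(data)):
--         deltas[i] = (data[i] - data[i - 1]) % 256
--
--     # Pack into 5-bit symbols, MSB first
--     bits = num_bits = 0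
--     out: list[str] = []
--     for byte in deltas:
--         bits = (bits << 8) | byte
--         num_bits += 8
--         while num_bits >= 5:
--             num_bits -= 5
--             out.append(alphabet[(bits >> num_bits) & 0x1F])
--     if num_bits:
--         out.append(alphabet[(bits << (5 - num_bits)) & 0x1F])
--
--     return "".join(out)
-- ===== SOURCE B (Python) =====
-- ALPHABET = "23456789ABCDEFGHJKLMNPQRSTUVWXYZ"
--
-- def _bd32_encode(text: str, alphabet: str = ALPHABET) -> str:
--     data = text.encode("utf-8")
--     if not data:
--         return ""
--     deltas = [data[0]] + [(b - a) % 256 for a, b in zip(data, data[1:])]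
--     bits = "".join(format(b, "08b") for b in deltas)
--     bits += "0" * (-len(bits) % 5)
--     return "".join(alphabet[int(bits[i:i+5], 2)] for i in range(0, len(bits), 5))
-- ===== Notes on version B (the rewrite author's own statement) =====
-- stated objective: simpler
-- what changed: Replaces the streaming shift-register bit packer with a two-pass build-then-chunk structure: join all deltas into one binary string, pad it on the right to a multiple of 5, and map each 5-bit chunk through the alphabet.
-- outside the precondition, e.g. on _bd32_encode('2', 'abcdefghi'): A returns 'gi', B returns 'gi'
import Mathlib
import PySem

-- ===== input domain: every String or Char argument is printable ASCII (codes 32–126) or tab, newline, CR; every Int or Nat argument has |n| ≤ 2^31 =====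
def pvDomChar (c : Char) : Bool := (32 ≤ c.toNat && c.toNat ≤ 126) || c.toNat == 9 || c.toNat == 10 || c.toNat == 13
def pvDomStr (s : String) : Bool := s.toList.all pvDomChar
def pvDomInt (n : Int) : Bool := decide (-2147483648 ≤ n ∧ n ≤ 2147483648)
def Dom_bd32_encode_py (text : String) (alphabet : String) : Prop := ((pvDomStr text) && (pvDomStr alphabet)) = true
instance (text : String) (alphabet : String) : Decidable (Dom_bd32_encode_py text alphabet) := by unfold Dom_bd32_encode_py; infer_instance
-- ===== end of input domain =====

-- B replaces A's streaming shift-register bit packer with a build-then-chunk two-pass structure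
-- (join all delta bytes into one binary string, pad it on the right to a multiple of 5, encode
-- each 5-bit chunk); objective: simpler. Equality of the RETURN value is proved on Pre_ below.

-- ===== PORT A =====
-- text.encode('utf-8'): on Dom every char is ASCII, so the byte list is the list of code points (exact on Dom)
def pvBytes (text : String) : List Nat := text.toList.map Char.toNat

-- alphabet[i] (i is always ≥ 0 here); total stand-in for Python indexing, exact under Pre_ (32 ≤ |alphabet|)
def pvGetCh (alph : List Char) (i : Nat) : Char := (PySem.List.pyGet? alph (i : Int)).getD ' '

-- 'for i in range(1, len(data)): deltas[i] = (data[i] - data[i-1]) % 256'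
def pvDeltaLoopA (prev : Nat) : List Nat → List Nat
  | [] => []
  | b :: rest => (PySem.Int.mod ((b : Int) - (prev : Int)) 256).toNat :: pvDeltaLoopA b rest

-- 'while num_bits >= 5: num_bits -= 5; out.append(alphabet[(bits >> num_bits) & 0x1F])'
def pvWhileA (alph : List Char) (bits : Nat) (nb : Nat) (out : List Char) : Nat × List Char :=
  if 5 ≤ nb then
    pvWhileA alph bits (nb - 5) (out ++ [pvGetCh alph ((bits >>> (nb - 5)) &&& 31)])
  else (nb, out)
termination_by nb
decreasing_by omega

-- loop body of 'for byte in deltas: …' (state: bits, num_bits, out)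
def pvStepA (alph : List Char) (st : Nat × Nat × List Char) (byte : Nat) : Nat × Nat × List Char :=
  let bits := (st.1 <<< 8) ||| byte
  let r := pvWhileA alph bits (st.2.1 + 8) st.2.2
  (bits, r.1, r.2)

def bd32_encode_py (text : String) (alphabet : String) : String :=
  match pvBytes text with
  | [] => ""                                  -- 'if not data: return ""'
  | d0 :: rest =>
    let alph := alphabet.toList
    let deltas := d0 :: pvDeltaLoopA d0 rest  -- 'deltas[0] = data[0]' + the loop
    let st := deltas.foldl (pvStepA alph) (0, 0, ([] : List Char))
    String.ofList (if st.2.1 ≠ 0 then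
        st.2.2 ++ [pvGetCh alph ((st.1 <<< (5 - st.2.1)) &&& 31)]
      else st.2.2)

-- ===== PORT B =====
-- int(chunk, 2) on a string of '0'/'1' digits (hand port, exact for such strings)
def pvBinVal (chunk : List Char) : Nat :=
  chunk.foldl (fun a c => 2 * a + (if c = '1' then 1 else 0)) 0

-- format(b, '08b') generalised: k-bit zero-padded binary digits of n, MSB first (hand port, exact)
def pvNatToBin : Nat → Nat → List Char
  | 0, _ => []
  | k + 1, n => pvNatToBin k (n / 2) ++ [if n % 2 = 1 then '1' else '0']

-- 'alphabet[int(bits[i:i+5], 2)] for i in range(0, len(bits), 5)'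
def pvChunksB (alph : List Char) : List Char → List Char
  | [] => []
  | c :: bits =>
    pvGetCh alph (pvBinVal ((c :: bits).take 5)) :: pvChunksB alph ((c :: bits).drop 5)
termination_by l => l.length
decreasing_by simp

def bd32_encode_py_alt (text : String) (alphabet : String) : String :=
  match pvBytes text with
  | [] => ""
  | d0 :: rest =>
    let alph := alphabet.toList
    let deltas := d0 :: ((d0 :: rest).zip rest).map
        (fun p => (PySem.Int.mod ((p.2 : Int) - (p.1 : Int)) 256).toNat)
    let bits := (deltas.map (pvNatToBin 8)).flatten
    let padded := bits ++ List.replicate ((5 - bits.length % 5) % 5) '0'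
    String.ofList (pvChunksB alph padded)

-- ===== PRECONDITION & SPEC =====
-- Pre_ excludes alphabets with fewer than 32 symbols (with nonempty text): there Python A raises
-- IndexError except when every 5-bit group happens to fall inside the short alphabet, an accident
-- of the particular bytes (e.g. ("2", "abcdefghi"), where both A and B return 'gi').
def Pre_bd32_encode_py (text : String) (alphabet : String) : Prop :=
  text = "" ∨ 32 ≤ alphabet.length
instance (text : String) (alphabet : String) : Decidable (Pre_bd32_encode_py text alphabet) := by
  unfold Pre_bd32_encode_py; infer_instance

def pvWitness_bd32_encode_py : String × String := ("HI", "23456789ABCDEFGHJKLMNPQRSTUVWXYZ")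

def Spec_bd32_encode_py (text : String) (alphabet : String) (out : String) : Prop :=
  out = bd32_encode_py_alt text alphabet
instance (text : String) (alphabet : String) (out : String) :
    Decidable (Spec_bd32_encode_py text alphabet out) := by
  unfold Spec_bd32_encode_py; infer_instance

-- ===== CLAIM (what is proved, stated in full; the proofs are below) =====
def Claim_equal_bd32_encode_py : Prop := ∀ (text : String) (alphabet : String),
  Dom_bd32_encode_py text alphabet → Pre_bd32_encode_py text alphabet →
  Spec_bd32_encode_py text alphabet (bd32_encode_py text alphabet)

-- ===== LEMMAS AND PROOFS =====

theorem pvBinVal_foldl (l : List Char) (a : Nat) :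
    l.foldl (fun a c => 2 * a + (if c = '1' then 1 else 0)) a = a * 2 ^ l.length + pvBinVal l := by
  induction l generalizing a with
  | nil => simp [pvBinVal]
  | cons c t ih =>
    simp only [List.foldl_cons, List.length_cons, pvBinVal] at *
    rw [ih, ih (2 * 0 + _)]
    ring

theorem pvBinVal_append (l₁ l₂ : List Char) :
    pvBinVal (l₁ ++ l₂) = pvBinVal l₁ * 2 ^ l₂.length + pvBinVal l₂ := by
  unfold pvBinVal
  rw [List.foldl_append, pvBinVal_foldl]
  rfl

theorem pvBinVal_lt (l : List Char) : pvBinVal l < 2 ^ l.length := by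
  induction l with
  | nil => simp [pvBinVal]
  | cons c t ih =>
    have h := pvBinVal_foldl t (2 * 0 + (if c = '1' then 1 else 0))
    simp only [pvBinVal, List.foldl_cons, List.length_cons] at *
    rw [h, pow_succ]
    split_ifs <;> omega

theorem pvShlOr (x b n : Nat) (h : b < 2 ^ n) : (x <<< n) ||| b = x * 2 ^ n + b := by
  set y := (x <<< n) ||| b with hy
  have hmod : y % 2 ^ n = b := by
    rw [hy, Nat.or_mod_two_pow, Nat.shiftLeft_eq, Nat.mul_mod_left, Nat.mod_eq_of_lt h]
    simp
  have hdiv : y / 2 ^ n = x := by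
    rw [hy, ← Nat.shiftRight_eq_div_pow, Nat.shiftRight_or_distrib,
      Nat.shiftLeft_shiftRight, Nat.shiftRight_eq_div_pow, Nat.div_eq_of_lt h]
    simp
  calc y = 2 ^ n * (y / 2 ^ n) + y % 2 ^ n := (Nat.div_add_mod y (2 ^ n)).symm
    _ = x * 2 ^ n + b := by rw [hdiv, hmod]; ring

theorem pvExtract (p c s : List Char) (hc : c.length = 5) :
    (pvBinVal (p ++ c ++ s) >>> s.length) &&& 31 = pvBinVal c := by
  have h31 : ∀ x : Nat, x &&& 31 = x % 32 := fun x => by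
    have := Nat.and_two_pow_sub_one_eq_mod x 5; simpa using this
  have hcv : pvBinVal c < 32 := by have := pvBinVal_lt c; rw [hc] at this; simpa using this
  have hsv : pvBinVal s < 2 ^ s.length := pvBinVal_lt s
  rw [List.append_assoc, pvBinVal_append, pvBinVal_append, h31,
    Nat.shiftRight_eq_div_pow, List.length_append, hc]
  have h2 : (0:Nat) < 2 ^ s.length := Nat.two_pow_pos _
  have hdiv : (pvBinVal p * 2 ^ (5 + s.length) + (pvBinVal c * 2 ^ s.length + pvBinVal s)) / 2 ^ s.length
      = pvBinVal p * 32 + pvBinVal c := by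
    rw [pow_add]
    rw [show pvBinVal p * (2 ^ 5 * 2 ^ s.length) + (pvBinVal c * 2 ^ s.length + pvBinVal s)
        = pvBinVal s + (pvBinVal p * 2 ^ 5 + pvBinVal c) * 2 ^ s.length by ring]
    rw [Nat.add_mul_div_right _ _ h2, Nat.div_eq_of_lt hsv]
    norm_num
  rw [hdiv]
  omega

-- full part of a bit list: the longest prefix whose length is a multiple of 5
def pvFull (l : List Char) : List Char := l.take (l.length - l.length % 5)

theorem pvNatToBin_length (k n : Nat) : (pvNatToBin k n).length = k := by
  induction k generalizing n with
  | zero => simp [pvNatToBin]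
  | succ k ih => simp [pvNatToBin, ih]

theorem pvNatToBin_val (k n : Nat) : pvBinVal (pvNatToBin k n) = n % 2 ^ k := by
  induction k generalizing n with
  | zero => simp [pvNatToBin, pvBinVal, Nat.mod_one]
  | succ k ih =>
    rw [pvNatToBin, pvBinVal_append, ih]
    have h1 : pvBinVal [if n % 2 = 1 then '1' else '0'] = n % 2 := by
      rcases Nat.mod_two_eq_zero_or_one n with h | h <;> simp [h, pvBinVal]
    rw [h1]
    have : 2 ^ (k + 1) = 2 * 2 ^ k := by ring
    rw [this, Nat.mod_mul]
    simp [List.length]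
    ring

theorem pvChunksB_nil (alph : List Char) : pvChunksB alph [] = [] := by rw [pvChunksB]

theorem pvChunksB_step (alph : List Char) (l : List Char) (h : l ≠ []) :
    pvChunksB alph l = pvGetCh alph (pvBinVal (l.take 5)) :: pvChunksB alph (l.drop 5) := by
  match l with
  | [] => exact absurd rfl h
  | c :: t => rw [pvChunksB]

-- chunking splits across a boundary at a multiple of 5
theorem pvChunksB_append (alph : List Char) (p q : List Char) (hp : p.length % 5 = 0) :
    pvChunksB alph (p ++ q) = pvChunksB alph p ++ pvChunksB alph q := by
  by_cases h0 : p = []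
  · simp [h0, pvChunksB_nil]
  · have h5 : 5 ≤ p.length := by
      have : p.length ≠ 0 := by simpa using h0
      omega
    rw [pvChunksB_step alph (p ++ q) (by simp [h0]), pvChunksB_step alph p h0,
      List.take_append_of_le_length h5, List.drop_append_of_le_length h5]
    rw [pvChunksB_append alph (p.drop 5) q (by simp; omega)]
    simp
termination_by p.length
decreasing_by simp; omega

theorem pvFull_length_mod (l : List Char) : (pvFull l).length % 5 = 0 := by
  unfold pvFull
  rw [List.length_take]
  omega

theorem pvFull_step (l : List Char) (h : 5 ≤ l.length) :
    pvFull l = l.take 5 ++ pvFull (l.drop 5) := by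
  unfold pvFull
  rw [List.length_drop]
  have h1 : l.length - l.length % 5 = 5 + (l.length - 5 - (l.length - 5) % 5) := by omega
  rw [h1, List.take_add]

theorem pvFull_small (l : List Char) (h : l.length < 5) : pvFull l = [] := by
  unfold pvFull
  have : l.length - l.length % 5 = 0 := by omega
  simp [this]

-- the while loop emits exactly the full 5-bit chunks of the pending bits
theorem pvWhileA_spec (alph : List Char) (pending p out : List Char) :
    pvWhileA alph (pvBinVal (p ++ pending)) pending.length out
      = (pending.length % 5, out ++ pvChunksB alph (pvFull pending)) := by
  by_cases h5 : 5 ≤ pending.length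
  · have hpe : pending = pending.take 5 ++ pending.drop 5 := (List.take_append_drop 5 pending).symm
    have htl : (pending.take 5).length = 5 := by rw [List.length_take]; omega
    have hd : (pending.drop 5).length = pending.length - 5 := by simp
    rw [pvWhileA, if_pos h5]
    have hx : (pvBinVal (p ++ pending) >>> (pending.length - 5)) &&& 31
        = pvBinVal (pending.take 5) := by
      have h := pvExtract p (pending.take 5) (pending.drop 5) htl
      rw [hd, List.append_assoc, ← hpe] at h
      exact h
    rw [hx]
    have IH := pvWhileA_spec alph (pending.drop 5) (p ++ pending.take 5)
      (out ++ [pvGetCh alph (pvBinVal (pending.take 5))])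
    rw [hd, List.append_assoc, ← hpe] at IH
    rw [IH]
    have hone : pvChunksB alph (pending.take 5) = [pvGetCh alph (pvBinVal (pending.take 5))] := by
      rw [pvChunksB_step alph _ (by intro hh; rw [hh] at htl; simp at htl)]
      rw [List.take_of_length_le (by omega), List.drop_eq_nil_of_le (by omega), pvChunksB_nil]
    rw [pvFull_step pending h5, pvChunksB_append alph _ _ (by rw [htl]), hone]
    simp
    omega
  · rw [pvWhileA, if_neg h5]
    rw [pvFull_small pending (by omega), pvChunksB_nil]
    simp
    omega
termination_by pending.length
decreasing_by simp; omega

def pvTail (l : List Char) : List Char := l.drop (l.length - l.length % 5)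

theorem pvFull_append_tail (l : List Char) : pvFull l ++ pvTail l = l :=
  List.take_append_drop _ l

theorem pvTail_length (l : List Char) : (pvTail l).length = l.length % 5 := by
  unfold pvTail
  rw [List.length_drop]
  have := Nat.mod_le l.length 5
  omega

theorem pvFull_append (p q : List Char) (hp : p.length % 5 = 0) :
    pvFull (p ++ q) = p ++ pvFull q := by
  unfold pvFull
  rw [List.length_append]
  have h1 : p.length + q.length - (p.length + q.length) % 5
      = p.length + (q.length - q.length % 5) := by
    have := Nat.mod_le q.length 5
    omega
  rw [h1, List.take_add, List.take_append_of_le_length (le_refl p.length), List.take_length,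
    List.drop_append_of_le_length (le_refl p.length), List.drop_length]
  simp

theorem pvFoldA_spec (alph : List Char) (ds : List Nat) (bl : List Char)
    (hds : ∀ b ∈ ds, b < 256) :
    ds.foldl (pvStepA alph)
      (pvBinVal bl, bl.length % 5, pvChunksB alph (pvFull bl))
    = (pvBinVal (bl ++ (ds.map (pvNatToBin 8)).flatten),
       (bl ++ (ds.map (pvNatToBin 8)).flatten).length % 5,
       pvChunksB alph (pvFull (bl ++ (ds.map (pvNatToBin 8)).flatten))) := by
  induction ds generalizing bl with
  | nil => simp
  | cons b ds ih =>
    have hb : b < 256 := hds b (by simp)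
    have hbin : pvBinVal (pvNatToBin 8 b) = b := by
      rw [pvNatToBin_val]
      norm_num
      omega
    have hbits : (pvBinVal bl <<< 8) ||| b = pvBinVal (bl ++ pvNatToBin 8 b) := by
      rw [pvShlOr _ _ _ (show b < 2 ^ 8 by norm_num; omega),
        pvBinVal_append, pvNatToBin_length, hbin]
    have hsplit : bl ++ pvNatToBin 8 b = pvFull bl ++ (pvTail bl ++ pvNatToBin 8 b) := by
      rw [← List.append_assoc, pvFull_append_tail]
    have hplen : (pvTail bl ++ pvNatToBin 8 b).length = bl.length % 5 + 8 := by
      rw [List.length_append, pvTail_length, pvNatToBin_length]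
    have hw := pvWhileA_spec alph (pvTail bl ++ pvNatToBin 8 b) (pvFull bl)
      (pvChunksB alph (pvFull bl))
    rw [← hsplit, hplen] at hw
    simp only [List.foldl_cons]
    have e1 : (bl.length % 5 + 8) % 5 = (bl ++ pvNatToBin 8 b).length % 5 := by
      rw [List.length_append, pvNatToBin_length]
      omega
    have e2 : pvChunksB alph (pvFull bl) ++ pvChunksB alph (pvFull (pvTail bl ++ pvNatToBin 8 b))
        = pvChunksB alph (pvFull (bl ++ pvNatToBin 8 b)) := by
      conv_rhs => rw [hsplit, pvFull_append _ _ (pvFull_length_mod bl)]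
      rw [pvChunksB_append alph _ _ (pvFull_length_mod bl)]
    have hstep : pvStepA alph
        (pvBinVal bl, bl.length % 5, pvChunksB alph (pvFull bl)) b
        = (pvBinVal (bl ++ pvNatToBin 8 b), (bl ++ pvNatToBin 8 b).length % 5,
           pvChunksB alph (pvFull (bl ++ pvNatToBin 8 b))) := by
      unfold pvStepA
      show ((pvBinVal bl <<< 8) ||| b,
        (pvWhileA alph ((pvBinVal bl <<< 8) ||| b) (bl.length % 5 + 8) (pvChunksB alph (pvFull bl))).1,
        (pvWhileA alph ((pvBinVal bl <<< 8) ||| b) (bl.length % 5 + 8) (pvChunksB alph (pvFull bl))).2) = _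
      rw [hbits, hw]
      show ((pvBinVal (bl ++ pvNatToBin 8 b)), (bl.length % 5 + 8) % 5,
        pvChunksB alph (pvFull bl) ++ pvChunksB alph (pvFull (pvTail bl ++ pvNatToBin 8 b))) = _
      rw [e1, e2]
    rw [hstep, ih _ (fun x hx => hds x (by simp [hx]))]
    simp [List.append_assoc]

theorem pvDelta_eq (prev : Nat) (xs : List Nat) :
    pvDeltaLoopA prev xs = ((prev :: xs).zip xs).map
      (fun p => (PySem.Int.mod ((p.2 : Int) - (p.1 : Int)) 256).toNat) := by
  induction xs generalizing prev with
  | nil => simp [pvDeltaLoopA]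
  | cons b rest ih => simp [pvDeltaLoopA, List.zip, ih]

theorem pvBinVal_zeros (k : Nat) : pvBinVal (List.replicate k '0') = 0 := by
  induction k with
  | zero => simp [pvBinVal]
  | succ k ih =>
    rw [List.replicate_succ]
    show List.foldl _ (2 * 0 + (if '0' = '1' then 1 else 0)) _ = 0
    simpa [pvBinVal] using ih

theorem pvDeltaLoopA_lt (prev : Nat) (xs : List Nat) :
    ∀ b ∈ pvDeltaLoopA prev xs, b < 256 := by
  induction xs generalizing prev with
  | nil => simp [pvDeltaLoopA]
  | cons x rest ih =>
    intro b hb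
    rw [pvDeltaLoopA] at hb
    rcases List.mem_cons.1 hb with h | h
    · subst h
      have h1 := PySem.Int.mod_lt ((x : Int) - (prev : Int)) (show (0:Int) < 256 by norm_num)
      have h2 := PySem.Int.mod_nonneg ((x : Int) - (prev : Int)) (show (0:Int) < 256 by norm_num)
      omega
    · exact ih x b h

-- one full (length-5) chunk encodes to a single symbol
theorem pvChunksB_single (alph : List Char) (c : List Char) (hc : c.length = 5) :
    pvChunksB alph c = [pvGetCh alph (pvBinVal c)] := by
  rw [pvChunksB_step alph c (by intro h; rw [h] at hc; simp at hc)]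
  rw [List.take_of_length_le (by omega), List.drop_eq_nil_of_le (by omega), pvChunksB_nil]

-- ===== VERDICT (by name: the statement is the Claim_ definition above) =====
theorem bd32_encode_py_spec : Claim_equal_bd32_encode_py := by
  intro text alphabet hdom _hpre
  unfold Spec_bd32_encode_py bd32_encode_py bd32_encode_py_alt
  have htext : ∀ n ∈ pvBytes text, n < 256 := by
    intro n hn
    unfold pvBytes at hn
    rcases List.mem_map.1 hn with ⟨c, hc, rfl⟩
    have hall : pvDomStr text = true := by
      have h := hdom
      unfold Dom_bd32_encode_py at h
      simp only [Bool.and_eq_true] at h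
      exact h.1
    have hch : pvDomChar c = true := by
      unfold pvDomStr at hall
      exact List.all_eq_true.1 hall c hc
    unfold pvDomChar at hch
    simp at hch
    omega
  cases hdata : pvBytes text with
  | nil => rfl
  | cons d0 rest =>
    have hd0 : d0 < 256 := htext d0 (by rw [hdata]; exact List.mem_cons_self ..)
    have hDlt : ∀ b ∈ d0 :: pvDeltaLoopA d0 rest, b < 256 := by
      intro x hx
      rcases List.mem_cons.1 hx with h | h
      · subst h; exact hd0
      · exact pvDeltaLoopA_lt d0 rest x h
    simp only []
    rw [← pvDelta_eq d0 rest]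
    set alph := alphabet.toList with halph
    set D := d0 :: pvDeltaLoopA d0 rest with hD
    set B := (D.map (pvNatToBin 8)).flatten with hB
    have hinit : ((0:Nat), (0:Nat), ([]:List Char))
        = (pvBinVal ([]:List Char), ([]:List Char).length % 5, pvChunksB alph (pvFull [])) := by
      simp [pvBinVal, pvFull, pvChunksB_nil]
    rw [hinit, pvFoldA_spec alph D [] hDlt]
    simp only [List.nil_append, ← hB]
    by_cases h0 : B.length % 5 = 0
    · rw [h0]
      norm_num
      have : pvFull B = B := by
        unfold pvFull
        rw [h0]
        simp
      rw [this]
    · have hlt5 : B.length % 5 < 5 := Nat.mod_lt _ (by norm_num)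
      have hpad : (5 - B.length % 5) % 5 = 5 - B.length % 5 := by omega
      rw [hpad]
      set pad := List.replicate (5 - B.length % 5) '0' with hpadl
      have hplen : pad.length = 5 - B.length % 5 := by simp [hpadl]
      have hclen : (pvTail B ++ pad).length = 5 := by
        rw [List.length_append, pvTail_length, hplen]
        omega
      have hBp : B ++ pad = pvFull B ++ (pvTail B ++ pad) := by
        rw [← List.append_assoc, pvFull_append_tail]
      have hkey : (pvBinVal B <<< (5 - B.length % 5)) &&& 31 = pvBinVal (pvTail B ++ pad) := by
        have hx := pvExtract (pvFull B) (pvTail B ++ pad) [] hclen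
        rw [List.append_nil, ← hBp] at hx
        have hv : pvBinVal (B ++ pad) = pvBinVal B <<< (5 - B.length % 5) := by
          rw [pvBinVal_append, hplen, Nat.shiftLeft_eq, hpadl, pvBinVal_zeros]
          omega
        rw [hv] at hx
        simpa using hx
      rw [if_pos h0, hkey]
      conv_rhs => rw [hBp, pvChunksB_append alph _ _ (pvFull_length_mod B),
        pvChunksB_single alph _ hclen]
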